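-- pv_equiv track=rewrite | github.com/selabhvl/ing301public | oevelser/1-setup/exercise1.py | to_tokens
-- ===== SOURCE A (Python) =====
-- def to_tokens(text):
--     result = []
--     text = text.strip()
--     word = ''
--     for c in text:
--         if c.isspace() or c == ';' or c == ',' or c == '.' or c == ':' or c == '?':
--             if len(word) != 0:
--                 result.append(word.lower())
--             word = ''
--         else:
--             word += c
--     if len(word) != 0:
--         result.append(word.lower())
--     return result
-- ===== SOURCE B (Python) =====
-- def to_tokens(text):
--     table = str.maketrans(';,.:?', '     ')
--     return [t.lower() for t in text.translate(table).split()]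
-- ===== Notes on version B (the rewrite author's own statement) =====
-- stated objective: idiomatic
-- what changed: Replaces the character-by-character word-buffer loop with translate-delimiters-to-space, str.split() on whitespace, then lowercase each token.
import Mathlib
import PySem

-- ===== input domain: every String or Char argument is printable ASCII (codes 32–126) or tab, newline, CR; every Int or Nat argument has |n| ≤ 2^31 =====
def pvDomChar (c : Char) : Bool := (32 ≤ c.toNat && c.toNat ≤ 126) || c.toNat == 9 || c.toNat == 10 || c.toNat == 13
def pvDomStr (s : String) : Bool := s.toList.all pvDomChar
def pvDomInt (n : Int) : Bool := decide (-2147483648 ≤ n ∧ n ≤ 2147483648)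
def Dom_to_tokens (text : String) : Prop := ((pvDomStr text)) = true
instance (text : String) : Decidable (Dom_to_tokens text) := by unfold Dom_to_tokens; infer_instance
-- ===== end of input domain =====

-- B replaces A's character-by-character word-buffer loop by translate-delimiters-to-space + split() + lowercase each token (idiomatic; a timing run measured it constant-factor faster).

-- ===== PORT A =====
-- A's delimiter test: c.isspace() or c in ";,.:?"
def pvDelim (c : Char) : Bool :=
  PySem.Chars.isspace c || c == ';' || c == ',' || c == '.' || c == ':' || c == '?'

-- one iteration of A's for-loop: state = (result, word); word kept as List Char,
-- word.lower() ported as PySem.Chars.lower at flush time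
def pvStepA (st : List String × List Char) (c : Char) : List String × List Char :=
  if pvDelim c then
    (if st.2.length ≠ 0 then st.1 ++ [String.ofList (PySem.Chars.lower st.2)] else st.1, [])
  else
    (st.1, st.2 ++ [c])

def to_tokens (text : String) : List String :=
  let st := (PySem.Str.strip text).toList.foldl pvStepA ([], [])
  if st.2.length ≠ 0 then st.1 ++ [String.ofList (PySem.Chars.lower st.2)] else st.1

-- ===== PORT B =====
-- text.translate(table): each of ';,.:?' becomes a space
def pvTr (c : Char) : Char :=
  if c == ';' || c == ',' || c == '.' || c == ':' || c == '?' then ' ' else c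

def to_tokens_alt (text : String) : List String :=
  (PySem.Chars.split₀ (text.toList.map pvTr)).map (fun t => String.ofList (PySem.Chars.lower t))

-- ===== PRECONDITION & SPEC =====
def Spec_to_tokens (text : String) (out : List String) : Prop := out = to_tokens_alt text
instance (text : String) (out : List String) : Decidable (Spec_to_tokens text out) := by unfold Spec_to_tokens; infer_instance

-- ===== CLAIM (what is proved, stated in full; the proofs are below) =====
def Claim_equal_to_tokens : Prop := ∀ (text : String), Dom_to_tokens text → Spec_to_tokens text (to_tokens text)

-- ===== LEMMAS AND PROOFS =====

-- a delimiter char becomes whitespace under the translation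
lemma pvIsspace_tr (c : Char) (h : pvDelim c = true) : PySem.Chars.isspace (pvTr c) = true := by
  unfold pvTr
  by_cases hp : (c == ';' || c == ',' || c == '.' || c == ':' || c == '?') = true
  · simp [hp]; decide
  · simp only [hp, if_neg]
    unfold pvDelim at h
    simp only [Bool.or_eq_true] at h hp
    push_neg at hp
    rcases h with ((((h|h)|h)|h)|h) | h <;> simp_all

-- a non-delimiter char is unchanged by the translation
lemma pvTr_of_not_delim (c : Char) (h : pvDelim c = false) : pvTr c = c := by
  unfold pvDelim at h
  unfold pvTr
  simp only [Bool.or_eq_false_iff] at h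
  simp [h.1.1.1.1.2, h.1.1.1.2, h.1.1.2, h.1.2, h.2]

-- whitespace is unchanged by the translation
lemma pvTr_of_isspace (c : Char) (h : PySem.Chars.isspace c = true) : pvTr c = c := by
  unfold pvTr
  by_cases hp : (c == ';' || c == ',' || c == '.' || c == ':' || c == '?') = true
  · exfalso
    simp only [Bool.or_eq_true, beq_iff_eq] at hp
    rcases hp with ((((hp|hp)|hp)|hp)|hp) <;> subst hp <;> simp [PySem.Chars.isspace] at h
  · simp [hp]

lemma pvGo_acc (cs : List Char) (cur : List Char) (acc : List (List Char)) :
    PySem.Chars.split₀.go cs cur acc = acc.reverse ++ PySem.Chars.split₀.go cs cur [] := by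
  induction cs generalizing cur acc with
  | nil =>
    by_cases h : cur.isEmpty <;> simp [PySem.Chars.split₀.go, h]
  | cons c rest ih =>
    by_cases hs : PySem.Chars.isspace c
    · by_cases hc : cur.isEmpty
      · simp only [PySem.Chars.split₀.go, hs, hc, ite_true]
        exact ih [] acc
      · simp only [PySem.Chars.split₀.go, hs, hc, ite_true, Bool.false_eq_true, ite_false]
        rw [ih [] (cur.reverse :: acc), ih [] [cur.reverse]]
        simp
    · have hs' : PySem.Chars.isspace c = false := by rwa [Bool.not_eq_true] at hs
      simp only [PySem.Chars.split₀.go, hs', Bool.false_eq_true, ite_false]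
      exact ih (c :: cur) acc

-- the main invariant: A's fold + final flush equals B's split-then-lower continuation
lemma pvMain (cs : List Char) (res : List String) (word : List Char) :
    (let st := cs.foldl pvStepA (res, word);
     if st.2.length ≠ 0 then st.1 ++ [String.ofList (PySem.Chars.lower st.2)] else st.1)
    = res ++ (PySem.Chars.split₀.go (cs.map pvTr) word.reverse []).map
        (fun t => String.ofList (PySem.Chars.lower t)) := by
  induction cs generalizing res word with
  | nil =>
    cases word with
    | nil => simp [PySem.Chars.split₀.go]
    | cons w ws => simp [PySem.Chars.split₀.go]
  | cons c rest ih =>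
    by_cases hd : pvDelim c
    · have hsp := pvIsspace_tr c hd
      cases word with
      | nil =>
        simp only [List.foldl_cons, pvStepA, hd, if_true, List.length_nil, ne_eq,
          not_true_eq_false, ite_false, List.map_cons, List.reverse_nil]
        rw [ih res []]
        simp [PySem.Chars.split₀.go, hsp]
      | cons w ws =>
        simp only [List.foldl_cons, pvStepA, hd, if_true, List.length_cons, ne_eq,
          Nat.succ_ne_zero, not_false_eq_true, List.map_cons]
        rw [ih (res ++ [String.ofList (PySem.Chars.lower (w :: ws))]) []]
        have hne : ((w :: ws).reverse).isEmpty = false := by simp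
        simp only [PySem.Chars.split₀.go, hsp, hne, ite_true, Bool.false_eq_true, ite_false]
        rw [pvGo_acc (rest.map pvTr) [] [(w :: ws).reverse.reverse]]
        simp
    · have hd' : pvDelim c = false := by rwa [Bool.not_eq_true] at hd
      have htr := pvTr_of_not_delim c hd'
      have hsp : PySem.Chars.isspace c = false := by
        unfold pvDelim at hd'; simp only [Bool.or_eq_false_iff] at hd'
        exact hd'.1.1.1.1.1
      simp only [List.foldl_cons, pvStepA, hd', Bool.false_eq_true, ite_false, List.map_cons, htr]
      rw [ih res (word ++ [c])]
      simp only [PySem.Chars.split₀.go, hsp, Bool.false_eq_true, ite_false, List.reverse_append,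
        List.reverse_cons, List.reverse_nil, List.nil_append, List.singleton_append]

-- dropping an all-whitespace suffix does not change split₀.go
lemma pvGo_append_space (cs : List Char) (c : Char) (h : PySem.Chars.isspace c = true)
    (cur : List Char) (acc : List (List Char)) :
    PySem.Chars.split₀.go (cs ++ [c]) cur acc = PySem.Chars.split₀.go cs cur acc := by
  induction cs generalizing cur acc with
  | nil =>
    by_cases hc : cur.isEmpty <;>
      simp [PySem.Chars.split₀.go, h, hc]
  | cons d rest ih =>
    by_cases hs : PySem.Chars.isspace d <;> by_cases hc : cur.isEmpty <;>
      simp [PySem.Chars.split₀.go, hs, hc, ih]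

lemma pvSplit_append_spaces (ws : List Char) (h : ∀ c ∈ ws, PySem.Chars.isspace c = true)
    (ds : List Char) :
    PySem.Chars.split₀ (ds ++ ws) = PySem.Chars.split₀ ds := by
  induction ws using List.reverseRecOn with
  | nil => simp
  | append_singleton ws' c ih =>
    unfold PySem.Chars.split₀
    rw [← List.append_assoc, pvGo_append_space (ds ++ ws') c (h c (by simp))]
    exact ih (fun c hc => h c (by simp [hc]))

lemma pvSplit_cons_space (c : Char) (h : PySem.Chars.isspace c = true) (cs : List Char) :
    PySem.Chars.split₀ (c :: cs) = PySem.Chars.split₀ cs := by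
  simp [PySem.Chars.split₀, PySem.Chars.split₀.go, h]

-- stripping whitespace at both ends does not change the token list
lemma pvSplit_lstrip (cs : List Char) :
    PySem.Chars.split₀ ((PySem.Chars.lstrip cs).map pvTr) = PySem.Chars.split₀ (cs.map pvTr) := by
  induction cs with
  | nil => rfl
  | cons c rest ih =>
    by_cases hs : PySem.Chars.isspace c
    · rw [PySem.Chars.lstrip] at *
      simp only [List.dropWhile_cons, hs, if_true, List.map_cons]
      rw [ih, pvTr_of_isspace c hs, pvSplit_cons_space c hs]
    · simp [PySem.Chars.lstrip, hs]

lemma pvSplit_rstrip (cs : List Char) :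
    PySem.Chars.split₀ ((PySem.Chars.rstrip cs).map pvTr) = PySem.Chars.split₀ (cs.map pvTr) := by
  have hdec : cs = PySem.Chars.rstrip cs ++ (cs.reverse.takeWhile PySem.Chars.isspace).reverse := by
    unfold PySem.Chars.rstrip
    rw [← List.reverse_append, List.takeWhile_append_dropWhile, List.reverse_reverse]
  conv_rhs => rw [hdec]
  rw [List.map_append]
  rw [pvSplit_append_spaces]
  intro c hc
  rw [List.mem_map] at hc
  obtain ⟨d, hd, hdc⟩ := hc
  rw [List.mem_reverse] at hd
  have hds := List.mem_takeWhile_imp hd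
  rw [← hdc, pvTr_of_isspace d hds]
  exact hds

-- ===== VERDICT (by name: the statement is the Claim_ definition above) =====
theorem to_tokens_spec : Claim_equal_to_tokens := by
  intro text _
  unfold Spec_to_tokens to_tokens to_tokens_alt
  rw [pvMain]
  have : PySem.Chars.split₀.go ((PySem.Str.strip text).toList.map pvTr) ([] : List Char).reverse []
      = PySem.Chars.split₀ ((PySem.Str.strip text).toList.map pvTr) := by
    simp [PySem.Chars.split₀]
  rw [this, PySem.Str.toList_strip, PySem.Chars.strip, pvSplit_rstrip, pvSplit_lstrip]
  simp
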